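-- pv_equiv track=rewrite | github.com/vsvandelik/cubbitt-fixer | src/fixer/_splitter.py | extract_string_number_from_number_unit_string
-- ===== SOURCE A (Python) =====
-- def extract_string_number_from_number_unit_string(text: str) -> str:
--     # fix of situation: "Back in 1892, 250 kilometres"
--     multiple_sentences_split = text.split(', ')
--     if len(multiple_sentences_split) > 1:
--         text = multiple_sentences_split[-1]
--
--     if not text[0].isdigit():
--         start = None
--         for idx, char in enumerate(text):
--             if not start and char.isdigit():
--                 start = idx
--             if start and char.isalpha():  # for eg. CZK 250 million -> get only 250
--                 return text[start:idx]
--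
--         return text[start:]
--
--     else:
--         for idx, char in enumerate(text):
--             if char.isalpha():
--                 return text[:idx].strip()
-- ===== SOURCE B (Python) =====
-- def extract_string_number_from_number_unit_string(text: str) -> str:
--     text = text.split(', ')[-1]
--
--     # Group the segment into maximal runs of one character class:
--     # 'd' (digits), 'a' (letters), 'o' (everything else).
--     runs = []
--     for c in text:
--         k = 'd' if c.isdigit() else ('a' if c.isalpha() else 'o')
--         if runs and runs[-1][0] == k:
--             runs[-1][1] += c
--         else:
--             runs.append([k, c])
--
--     if text[0].isdigit():
--         # everything up to the first letter run, stripped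
--         out = []
--         for k, r in runs:
--             if k == 'a':
--                 break
--             out.append(r)
--         return ''.join(out).strip()
--
--     # skip runs until the first digit run, then take runs up to the next letter run
--     out = []
--     started = False
--     for k, r in runs:
--         if not started:
--             if k != 'd':
--                 continue
--             started = True
--         if k == 'a':
--             break
--         out.append(r)
--     if not started:
--         return text
--     return ''.join(out)
-- ===== Notes on version B (the rewrite author's own statement) =====
-- stated objective: alternative
-- what changed: B groups the last ', '-segment into maximal runs of one character class (digit/letter/other) in one pass and then selects whole runs at the run level (take runs up to the first letter run, or skip to the first digit run and take until a letter run), replacing A's per-character enumerate loops with an Optional `start` index accumulator.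
-- outside the precondition, e.g. on extract_string_number_from_number_unit_string('250'): A returns None, B returns '250'; on extract_string_number_from_number_unit_string(''): A raises IndexError, B raises IndexError
import Mathlib
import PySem

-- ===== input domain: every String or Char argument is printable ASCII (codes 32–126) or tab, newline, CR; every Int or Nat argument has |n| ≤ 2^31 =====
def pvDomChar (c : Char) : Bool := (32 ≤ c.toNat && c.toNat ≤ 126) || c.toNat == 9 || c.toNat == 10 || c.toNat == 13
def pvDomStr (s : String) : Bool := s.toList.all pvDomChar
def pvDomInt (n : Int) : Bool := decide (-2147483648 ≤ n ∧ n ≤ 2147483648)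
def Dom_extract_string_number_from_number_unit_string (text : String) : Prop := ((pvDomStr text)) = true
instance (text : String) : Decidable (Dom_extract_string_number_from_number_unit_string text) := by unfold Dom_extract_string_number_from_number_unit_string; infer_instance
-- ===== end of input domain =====

-- B replaces A's per-character index loops (with an Optional `start` accumulator) by a run-length
-- grouping of the segment into maximal character-class runs, selected at the run level; objective:
-- alternative, same cost.

-- ===== PORT A =====
-- Shared first line of both Pythons: parts = text.split(', '); if len(parts) > 1: text = parts[-1].
-- split with a non-empty separator never yields [], so getLastD [] is exact for parts[-1].
def pvSeg (text : String) : List Char :=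
  let parts := PySem.Chars.splitOn text.toList ", ".toList
  if parts.length > 1 then parts.getLastD [] else text.toList

-- A's first loop (branch where text[0] is not a digit): enumerate carrying the optional `start`.
def pvALoop1 (orig rest : List Char) (idx : Nat) (start : Option Nat) : String :=
  match rest with
  | [] =>
    -- return text[start:]  (start = None slices the whole string; 0 ≤ start ≤ len, so drop is exact)
    match start with
    | none => String.ofList orig
    | some s => String.ofList (orig.drop s)
  | c :: rest' =>
    -- if not start and char.isdigit(): start = idx   (Python's `not start` is true for None and for 0)
    let start' := if (start == none || start == some 0) && PySem.Chars.isdigit c then some idx else start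
    -- if start and char.isalpha(): return text[start:idx]   (0 ≤ start ≤ idx ≤ len, so take/drop is exact)
    match start' with
    | some s => if s != 0 && PySem.Chars.isalpha c then String.ofList ((orig.drop s).take (idx - s))
                else pvALoop1 orig rest' (idx + 1) start'
    | none => pvALoop1 orig rest' (idx + 1) none

-- A's second loop (text[0] is a digit): the first letter stops it.
def pvALoop2 (orig rest : List Char) (idx : Nat) : String :=
  match rest with
  | [] => ""   -- Python falls off the function and returns None (not a str); Pre_ excludes these inputs
  | c :: rest' =>
    if PySem.Chars.isalpha c then String.ofList (PySem.Chars.strip (orig.take idx))  -- text[:idx].strip()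
    else pvALoop2 orig rest' (idx + 1)

def extract_string_number_from_number_unit_string (text : String) : String :=
  let cs := pvSeg text
  match cs with
  | [] => ""   -- text[0] raises IndexError; excluded by Pre_
  | c :: _ =>
    if !(PySem.Chars.isdigit c) then pvALoop1 cs cs 0 none
    else pvALoop2 cs cs 0

-- ===== PORT B =====
-- character class: 0 = digit ('d'), 1 = letter ('a'), 2 = other ('o')
def pvCls (c : Char) : Nat :=
  if PySem.Chars.isdigit c then 0 else if PySem.Chars.isalpha c then 1 else 2

-- one step of B's grouping loop: merge c into the last run or open a new one
def pvRunsStep (runs : List (Nat × List Char)) (c : Char) : List (Nat × List Char) :=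
  let k := pvCls c
  match runs.getLast? with
  | some (k', r) => if k' = k then runs.dropLast ++ [(k', r ++ [c])] else runs ++ [(k, [c])]
  | none => [(k, [c])]

def pvRuns (cs : List Char) : List (Nat × List Char) := cs.foldl pvRunsStep []

-- B's digit-first loop over runs: collect runs until the first letter run ('break')
def pvTakeRuns : List (Nat × List Char) → List Char
  | [] => []
  | (k, r) :: more => if k = 1 then [] else r ++ pvTakeRuns more

-- B's other loop over runs: skip until the first digit run ('continue'), then collect until a
-- letter run; none = `started` stayed False
def pvSkipRuns : List (Nat × List Char) → Option (List Char)
  | [] => none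
  | (k, r) :: more => if k = 0 then some (r ++ pvTakeRuns more) else pvSkipRuns more

def extract_string_number_from_number_unit_string_alt (text : String) : String :=
  let cs := pvSeg text
  match cs with
  | [] => ""   -- text[0] raises IndexError in B too; excluded by Pre_
  | c :: _ =>
    let runs := pvRuns cs
    if PySem.Chars.isdigit c then
      String.ofList (PySem.Chars.strip (pvTakeRuns runs))
    else
      match pvSkipRuns runs with
      | none => String.ofList cs
      | some out => String.ofList out

-- ===== PRECONDITION & SPEC =====
-- Pre_ excludes the inputs where A raises IndexError (the last ', '-segment is empty) and the
-- inputs where A returns Python's None instead of a str (the segment starts with a digit but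
-- contains no letter, so A's digit-branch loop falls off the end).
def Pre_extract_string_number_from_number_unit_string (text : String) : Prop :=
  pvSeg text ≠ [] ∧
    (PySem.Chars.isdigit ((pvSeg text).headD ' ') = true →
      (pvSeg text).any PySem.Chars.isalpha = true)
instance (text : String) : Decidable (Pre_extract_string_number_from_number_unit_string text) := by
  unfold Pre_extract_string_number_from_number_unit_string; infer_instance

def pvWitness_extract_string_number_from_number_unit_string : String := "250 km"

def Spec_extract_string_number_from_number_unit_string (text : String) (out : String) : Prop := out = extract_string_number_from_number_unit_string_alt text
instance (text : String) (out : String) : Decidable (Spec_extract_string_number_from_number_unit_string text out) := by unfold Spec_extract_string_number_from_number_unit_string; infer_instance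

-- ===== CLAIM (what is proved, stated in full; the proofs are below) =====
def Claim_equal_extract_string_number_from_number_unit_string : Prop := ∀ (text : String), Dom_extract_string_number_from_number_unit_string text → Pre_extract_string_number_from_number_unit_string text → Spec_extract_string_number_from_number_unit_string text (extract_string_number_from_number_unit_string text)

-- ===== LEMMAS AND PROOFS =====

theorem pv_digit_not_alpha (c : Char) (h : PySem.Chars.isdigit c = true) :
    PySem.Chars.isalpha c = false := by
  simp only [PySem.Chars.isdigit, Bool.and_eq_true, decide_eq_true_eq] at h
  simp only [PySem.Chars.isalpha, PySem.Chars.isupper, PySem.Chars.islower,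
    Bool.or_eq_false_iff, Bool.and_eq_false_iff, decide_eq_false_iff_not, not_le]
  obtain ⟨h1, h2⟩ := h
  rw [Char.le_def] at h2
  have h3 : c.val.toNat ≤ 57 := UInt32.le_iff_toNat_le.mp h2
  constructor <;> left <;> rw [Char.lt_def, UInt32.lt_iff_toNat_lt] <;>
    simp only [show ('A' : Char).val.toNat = 65 from rfl,
      show ('a' : Char).val.toNat = 97 from rfl] <;> omega

theorem pvCls_eq_one (c : Char) : pvCls c = 1 ↔ PySem.Chars.isalpha c = true := by
  unfold pvCls
  by_cases hd : PySem.Chars.isdigit c = true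
  · simp [hd, pv_digit_not_alpha c hd]
  · simp only [Bool.not_eq_true] at hd
    by_cases ha : PySem.Chars.isalpha c = true <;> simp [hd, ha]

-- ===== A-side characterisations (A's loops in terms of findIdx?) =====

theorem pvALoop1_some (orig : List Char) (rest : List Char) :
    ∀ (idx s : Nat), 1 ≤ s →
    pvALoop1 orig rest idx (some s) =
      match rest.findIdx? PySem.Chars.isalpha with
      | some j => String.ofList ((orig.drop s).take (idx + j - s))
      | none => String.ofList (orig.drop s) := by
  induction rest with
  | nil => intro idx s hs; simp [pvALoop1]
  | cons c r ih =>
    intro idx s hs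
    rw [List.findIdx?_cons]
    have hs0 : ((some s : Option Nat) == some 0) = false := by
      simp only [beq_eq_false_iff_ne, ne_eq, Option.some.injEq]; omega
    have hsne : (s != 0) = true := by simp only [bne_iff_ne, ne_eq]; omega
    by_cases ha : PySem.Chars.isalpha c = true
    · simp [pvALoop1, hs0, hsne, ha]
    · simp only [Bool.not_eq_true] at ha
      have hred : pvALoop1 orig (c :: r) idx (some s) = pvALoop1 orig r (idx + 1) (some s) := by
        simp [pvALoop1, hs0, hsne, ha]
      rw [hred, ih (idx + 1) s hs]
      simp only [ha, Bool.false_eq_true, if_false]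
      cases hf : r.findIdx? PySem.Chars.isalpha with
      | none => simp
      | some j =>
        simp only [Option.map_some]
        rw [show idx + 1 + j = idx + (j + 1) from by omega]

theorem pvALoop1_none (orig : List Char) (rest : List Char) :
    ∀ idx : Nat, 1 ≤ idx →
    pvALoop1 orig rest idx none =
      match rest.findIdx? PySem.Chars.isdigit with
      | none => String.ofList orig
      | some j =>
        match (rest.drop (j + 1)).findIdx? PySem.Chars.isalpha with
        | some j2 => String.ofList ((orig.drop (idx + j)).take (j2 + 1))
        | none => String.ofList (orig.drop (idx + j)) := by
  induction rest with
  | nil => intro idx _; simp [pvALoop1]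
  | cons c r ih =>
    intro idx hidx
    rw [List.findIdx?_cons]
    by_cases hd : PySem.Chars.isdigit c = true
    · have ha : PySem.Chars.isalpha c = false := pv_digit_not_alpha c hd
      have hine : (idx != 0) = true := by simp only [bne_iff_ne, ne_eq]; omega
      have hred : pvALoop1 orig (c :: r) idx none = pvALoop1 orig r (idx + 1) (some idx) := by
        simp [pvALoop1, hd, ha, hine]
      rw [hred, pvALoop1_some orig r (idx + 1) idx (by omega)]
      simp only [hd, if_true, List.drop_succ_cons, List.drop_zero]
      cases hf : r.findIdx? PySem.Chars.isalpha with
      | none => simp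
      | some j2 =>
        simp [show idx + 1 + j2 - idx = j2 + 1 from by omega]
    · simp only [Bool.not_eq_true] at hd
      have hred : pvALoop1 orig (c :: r) idx none = pvALoop1 orig r (idx + 1) none := by
        simp [pvALoop1, hd]
      rw [hred, ih (idx + 1) (by omega)]
      simp only [hd, Bool.false_eq_true, if_false]
      cases hf : r.findIdx? PySem.Chars.isdigit with
      | none => simp
      | some j =>
        simp only [Option.map_some, List.drop_succ_cons]
        rw [show idx + 1 + j = idx + (j + 1) from by omega]

theorem pvALoop2_eq (orig rest : List Char) :
    ∀ idx : Nat,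
    pvALoop2 orig rest idx =
      match rest.findIdx? PySem.Chars.isalpha with
      | some j => String.ofList (PySem.Chars.strip (orig.take (idx + j)))
      | none => "" := by
  induction rest with
  | nil => intro idx; simp [pvALoop2]
  | cons c r ih =>
    intro idx
    rw [List.findIdx?_cons]
    by_cases ha : PySem.Chars.isalpha c = true
    · simp [pvALoop2, ha]
    · simp only [Bool.not_eq_true] at ha
      simp only [pvALoop2, ha, Bool.false_eq_true, if_false, ih (idx + 1)]
      cases hf : r.findIdx? PySem.Chars.isalpha with
      | none => simp
      | some j =>
        simp only [Option.map_some]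
        rw [show idx + 1 + j = idx + (j + 1) from by omega]

-- ===== B-side characterisations (the run machinery in terms of takeWhile/findIdx?) =====

-- the accumulator prefix in front of the last run is inert under the grouping fold
theorem pvRuns_foldl_append (cs : List Char) :
    ∀ (acc : List (Nat × List Char)) (k : Nat) (r : List Char),
      List.foldl pvRunsStep (acc ++ [(k, r)]) cs =
        acc ++ List.foldl pvRunsStep [(k, r)] cs := by
  induction cs with
  | nil => intro acc k r; simp
  | cons c cs ih =>
    intro acc k r
    simp only [List.foldl_cons]
    by_cases hk : k = pvCls c
    · have h1 : pvRunsStep (acc ++ [(k, r)]) c = acc ++ [(k, r ++ [c])] := by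
        simp [pvRunsStep, hk]
      have h2 : pvRunsStep [(k, r)] c = [(k, r ++ [c])] := by
        simp [pvRunsStep, hk]
      rw [h1, h2, ih acc k (r ++ [c])]
    · have h1 : pvRunsStep (acc ++ [(k, r)]) c = (acc ++ [(k, r)]) ++ [(pvCls c, [c])] := by
        simp [pvRunsStep, hk]
      have h2 : pvRunsStep [(k, r)] c = [(k, r)] ++ [(pvCls c, [c])] := by
        simp [pvRunsStep, hk]
      rw [h1, h2, ih (acc ++ [(k, r)]) (pvCls c) [c], ih [(k, r)] (pvCls c) [c],
        List.append_assoc]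

-- the fold restarted from a single open run, and its recursion equation
def pvRunsNE (k : Nat) (r : List Char) (cs : List Char) : List (Nat × List Char) :=
  List.foldl pvRunsStep [(k, r)] cs

theorem pvRunsNE_cons (k : Nat) (r : List Char) (c : Char) (cs : List Char) :
    pvRunsNE k r (c :: cs) =
      if pvCls c = k then pvRunsNE k (r ++ [c]) cs
      else (k, r) :: pvRunsNE (pvCls c) [c] cs := by
  unfold pvRunsNE
  simp only [List.foldl_cons]
  by_cases hk : pvCls c = k
  · have h2 : pvRunsStep [(k, r)] c = [(k, r ++ [c])] := by simp [pvRunsStep, hk]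
    rw [h2, if_pos hk]
  · have h2 : pvRunsStep [(k, r)] c = [(k, r)] ++ [(pvCls c, [c])] := by
      simp [pvRunsStep]; intro h; exact absurd h.symm hk
    rw [h2, if_neg hk, pvRuns_foldl_append cs [(k, r)] (pvCls c) [c]]
    rfl

theorem pvRunsNE_head (cs : List Char) :
    ∀ (k : Nat) (r : List Char), ∃ r' rest, pvRunsNE k r cs = (k, r') :: rest := by
  induction cs with
  | nil => intro k r; exact ⟨r, [], rfl⟩
  | cons c cs ih =>
    intro k r
    rw [pvRunsNE_cons]
    by_cases hk : pvCls c = k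
    · rw [if_pos hk]; exact ih k (r ++ [c])
    · rw [if_neg hk]; exact ⟨r, pvRunsNE (pvCls c) [c] cs, rfl⟩

theorem pvTakeRuns_runsNE (cs : List Char) :
    ∀ (k : Nat) (r : List Char), k ≠ 1 →
      pvTakeRuns (pvRunsNE k r cs) = r ++ cs.takeWhile (fun d => !PySem.Chars.isalpha d) := by
  induction cs with
  | nil => intro k r hk; simp [pvRunsNE, pvTakeRuns, hk]
  | cons c cs ih =>
    intro k r hk
    rw [pvRunsNE_cons, List.takeWhile_cons]
    by_cases hkc : pvCls c = k
    · have hca : (!PySem.Chars.isalpha c) = true := by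
        simp only [Bool.not_eq_true']
        by_cases h : PySem.Chars.isalpha c = true
        · exact absurd (hkc ▸ (pvCls_eq_one c).mpr h) hk
        · simpa using h
      rw [if_pos hkc, ih k (r ++ [c]) hk, hca, if_pos rfl]
      simp
    · rw [if_neg hkc]
      by_cases hca : PySem.Chars.isalpha c = true
      · have h1 : pvCls c = 1 := (pvCls_eq_one c).mpr hca
        obtain ⟨r', rest, hh⟩ := pvRunsNE_head cs 1 [c]
        rw [h1, hh]
        simp [pvTakeRuns, hk, hca]
      · have h1 : pvCls c ≠ 1 := fun h => hca ((pvCls_eq_one c).mp h)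
        have hca' : PySem.Chars.isalpha c = false := by simpa using hca
        simp [pvTakeRuns, hk, ih (pvCls c) [c] h1, hca']

theorem pvSkipRuns_runsNE_zero (cs : List Char) :
    ∀ (r : List Char),
      pvSkipRuns (pvRunsNE 0 r cs) =
        some (r ++ cs.takeWhile (fun d => !PySem.Chars.isalpha d)) := by
  induction cs with
  | nil => intro r; simp [pvRunsNE, pvSkipRuns, pvTakeRuns]
  | cons c cs ih =>
    intro r
    rw [pvRunsNE_cons, List.takeWhile_cons]
    by_cases hkc : pvCls c = 0
    · have hca : (!PySem.Chars.isalpha c) = true := by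
        simp only [Bool.not_eq_true']
        by_cases h : PySem.Chars.isalpha c = true
        · exact absurd ((pvCls_eq_one c).mpr h) (by rw [hkc]; omega)
        · simpa using h
      rw [if_pos hkc, ih (r ++ [c]), hca, if_pos rfl]
      simp
    · rw [if_neg hkc]
      by_cases hca : PySem.Chars.isalpha c = true
      · have h1 : pvCls c = 1 := (pvCls_eq_one c).mpr hca
        obtain ⟨r', rest, hh⟩ := pvRunsNE_head cs 1 [c]
        rw [h1, hh]
        simp [pvSkipRuns, pvTakeRuns, hca]
      · have h1 : pvCls c ≠ 1 := fun h => hca ((pvCls_eq_one c).mp h)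
        have hca' : PySem.Chars.isalpha c = false := by simpa using hca
        simp [pvSkipRuns, pvTakeRuns_runsNE cs (pvCls c) [c] h1, hca']

theorem pvSkipRuns_runsNE (cs : List Char) :
    ∀ (k : Nat) (r : List Char), k ≠ 0 →
      pvSkipRuns (pvRunsNE k r cs) =
        match cs.findIdx? PySem.Chars.isdigit with
        | none => none
        | some s => some ((cs.drop s).takeWhile (fun d => !PySem.Chars.isalpha d)) := by
  induction cs with
  | nil => intro k r hk; simp [pvRunsNE, pvSkipRuns, hk]
  | cons c cs ih =>
    intro k r hk
    rw [pvRunsNE_cons, List.findIdx?_cons]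
    by_cases hdc : PySem.Chars.isdigit c = true
    · have h0 : pvCls c = 0 := by simp [pvCls, hdc]
      have hkc : pvCls c ≠ k := by rw [h0]; exact fun h => hk h.symm
      rw [if_neg hkc]
      have hca : (!PySem.Chars.isalpha c) = true := by
        simp [pv_digit_not_alpha c hdc]
      have hred : pvSkipRuns ((k, r) :: pvRunsNE (pvCls c) [c] cs) =
          pvSkipRuns (pvRunsNE (pvCls c) [c] cs) := by simp [pvSkipRuns, hk]
      rw [hred, h0, pvSkipRuns_runsNE_zero cs [c]]
      simp [hdc, hca]
    · have hdc' : PySem.Chars.isdigit c = false := by simpa using hdc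
      have h0 : pvCls c ≠ 0 := by
        simp only [pvCls, hdc', Bool.false_eq_true, if_false]
        split_ifs <;> omega
      have step : pvSkipRuns
          (if pvCls c = k then pvRunsNE k (r ++ [c]) cs
           else (k, r) :: pvRunsNE (pvCls c) [c] cs) =
          pvSkipRuns (pvRunsNE (pvCls c) [c] cs) := by
        by_cases hkc : pvCls c = k
        · rw [if_pos hkc, ← hkc, ih (pvCls c) (r ++ [c]) h0, ih (pvCls c) [c] h0]
        · rw [if_neg hkc]; simp [pvSkipRuns, hk]
      rw [step, ih (pvCls c) [c] h0]
      simp only [hdc', Bool.false_eq_true, if_false]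
      cases hf : cs.findIdx? PySem.Chars.isdigit with
      | none => simp
      | some s => simp

-- takeWhile (not alpha) in terms of the first letter index
theorem pv_takeWhile_alpha (cs : List Char) :
    cs.takeWhile (fun d => !PySem.Chars.isalpha d) =
      match cs.findIdx? PySem.Chars.isalpha with
      | some a => cs.take a
      | none => cs := by
  induction cs with
  | nil => simp
  | cons c cs ih =>
    rw [List.takeWhile_cons, List.findIdx?_cons]
    by_cases ha : PySem.Chars.isalpha c = true
    · simp [ha]
    · have ha' : PySem.Chars.isalpha c = false := by simpa using ha
      simp only [ha', Bool.not_false, Bool.false_eq_true, if_false, ih]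
      cases hf : cs.findIdx? PySem.Chars.isalpha with
      | none => simp
      | some a => simp

-- ===== VERDICT (by name: the statement is the Claim_ definition above) =====
theorem extract_string_number_from_number_unit_string_spec : Claim_equal_extract_string_number_from_number_unit_string := by
  intro text _ hpre
  unfold Spec_extract_string_number_from_number_unit_string
  obtain ⟨hne, hdig⟩ := hpre
  unfold extract_string_number_from_number_unit_string
    extract_string_number_from_number_unit_string_alt
  cases hcs : pvSeg text with
  | nil => exact absurd hcs hne
  | cons c t =>
    simp only [hcs, List.headD_cons] at hdig ⊢
    have hruns : pvRuns (c :: t) = pvRunsNE (pvCls c) [c] t := by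
      simp [pvRuns, pvRunsNE, pvRunsStep]
    by_cases hd : PySem.Chars.isdigit c = true
    · -- digit-first branch
      have hany : (c :: t).any PySem.Chars.isalpha = true := hdig hd
      have hsome : ((c :: t).findIdx? PySem.Chars.isalpha).isSome = true := by
        rw [List.findIdx?_isSome]; exact hany
      obtain ⟨a, hfa⟩ := Option.isSome_iff_exists.mp hsome
      have h0 : pvCls c = 0 := by simp [pvCls, hd]
      have hBtw : pvTakeRuns (pvRuns (c :: t)) =
          (c :: t).takeWhile (fun d => !PySem.Chars.isalpha d) := by
        rw [hruns, h0, pvTakeRuns_runsNE t 0 [c] (by omega), List.takeWhile_cons]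
        simp [pv_digit_not_alpha c hd]
      rw [pvALoop2_eq, hfa]
      simp only [hd, Bool.not_true, Bool.false_eq_true, if_false]
      rw [hBtw, pv_takeWhile_alpha, hfa]
      simp
    · -- non-digit-first branch
      have hd' : PySem.Chars.isdigit c = false := by simpa using hd
      have h0 : pvCls c ≠ 0 := by
        simp only [pvCls, hd', Bool.false_eq_true, if_false]
        split_ifs <;> omega
      have step : pvALoop1 (c :: t) (c :: t) 0 none = pvALoop1 (c :: t) t 1 none := by
        simp [pvALoop1, hd']
      rw [if_pos (by simp [hd']), step, pvALoop1_none (c :: t) t 1 (by omega),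
        if_neg (by simp [hd']), hruns, pvSkipRuns_runsNE t (pvCls c) [c] h0]
      cases hf : t.findIdx? PySem.Chars.isdigit with
      | none => simp
      | some j =>
        simp only
        obtain ⟨hjlt, hjdig, -⟩ := List.findIdx?_eq_some_iff_getElem.mp hf
        have hdropt : t.drop j = t[j] :: t.drop (j + 1) := List.drop_eq_getElem_cons hjlt
        rw [hdropt, List.takeWhile_cons]
        have hja : (!PySem.Chars.isalpha t[j]) = true := by
          simp [pv_digit_not_alpha _ hjdig]
        rw [hja, if_pos rfl, pv_takeWhile_alpha]
        cases hf2 : (t.drop (j + 1)).findIdx? PySem.Chars.isalpha with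
        | none =>
          simp only
          have : (c :: t).drop (1 + j) = t.drop j := by
            rw [show 1 + j = j + 1 from by omega]; simp
          rw [this, hdropt]
        | some j2 =>
          simp only
          have h1 : (c :: t).drop (1 + j) = t.drop j := by
            rw [show 1 + j = j + 1 from by omega]; simp
          rw [h1, hdropt, List.take_succ_cons]
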